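-- pv_equiv track=rewrite | github.com/KI-Campus/FU_Chatbot | src/loaders/pdf.py | _is_diagram_noise_line
-- ===== SOURCE A (Python) =====
-- def _is_diagram_noise_line(line: str) -> bool:
--     """
--     Legacy line-level heuristic from the original implementation, kept for compatibility.
--     """
--     stripped = line.strip()
--     if not stripped:
--         return False
--
--     words = stripped.split()
--
--     # Very short lines with single characters
--     if len(stripped) <= 4 and len(words) <= 2:
--         return True
--
--     # Lines with many single letters/spaces
--     if len(words) >= 5:
--         single_char_count = sum(1 for word in words if len(word) == 1)
--         if single_char_count / len(words) > 0.6: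
--             return True
--
--     # Lines with only numbers and very short words
--     if len(words) >= 3:
--         short_word_count = sum(1 for word in words if len(word) <= 2)
--         if short_word_count / len(words) > 0.8:
--             return True
--
--     # Check for excessive repetition of same character
--     unique_chars = set(line.replace(" ", "").replace("\n", ""))
--     if len(unique_chars) <= 2 and len(line.replace(" ", "")) > 15:
--         return True
--
--     # Check if line consists mainly of repeated single letters with numbers
--     if len(words) > 4:
--         letter_count = sum(1 for word in words if len(word) <= 2 and word.isalpha())
--         if letter_count / len(words) > 0.5:
--             return True
--
--     return False
-- ===== SOURCE B (Python) =====
-- def _is_diagram_noise_line(line: str) -> bool: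
--     # Single character-level scan: a whitespace/word state machine replaces
--     # strip()/split() and the four counting passes entirely.
--     n = single = short = letter = 0      # word statistics
--     wl = 0                               # length of the word being read
--     alpha = True                         # word so far entirely alphabetic
--     seen = False                         # any non-whitespace met yet
--     gap = 0                              # whitespace run since last non-ws char
--     body = 0                             # length of line.strip(), built incrementally
--     nonspace = 0                         # len(line) without " "
--     chars = set()                        # chars of line without " " and "\n"
--     for ch in line:
--         if ch.isspace():
--             if wl:
--                 n += 1
--                 if wl == 1:
--                     single += 1
--                 if wl <= 2:
--                     short += 1
--                     if alpha:
--                         letter += 1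
--                 wl = 0
--                 alpha = True
--             if seen:
--                 gap += 1
--         else:
--             seen = True
--             body += gap + 1
--             gap = 0
--             wl += 1
--             if alpha and not ch.isalpha():
--                 alpha = False
--         if ch != " ":
--             nonspace += 1
--             if ch != "\n":
--                 chars.add(ch)
--     if wl:
--         n += 1
--         if wl == 1:
--             single += 1
--         if wl <= 2:
--             short += 1
--             if alpha:
--                 letter += 1
--     if not seen:
--         return False
--     return ((body <= 4 and n <= 2)
--             or (n >= 5 and single / n > 0.6)
--             or (n >= 3 and short / n > 0.8)
--             or (len(chars) <= 2 and nonspace > 15)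
--             or (n > 4 and letter / n > 0.5))
-- ===== Notes on version B (the rewrite author's own statement) =====
-- stated objective: alternative
-- what changed: B replaces A's strip()/split() plus four separate counting passes by a single character-level whitespace/word state machine over the raw line that builds the word statistics, the stripped length, the non-space length and the distinct-character set in one scan, then evaluates the same thresholds once.
import Mathlib
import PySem

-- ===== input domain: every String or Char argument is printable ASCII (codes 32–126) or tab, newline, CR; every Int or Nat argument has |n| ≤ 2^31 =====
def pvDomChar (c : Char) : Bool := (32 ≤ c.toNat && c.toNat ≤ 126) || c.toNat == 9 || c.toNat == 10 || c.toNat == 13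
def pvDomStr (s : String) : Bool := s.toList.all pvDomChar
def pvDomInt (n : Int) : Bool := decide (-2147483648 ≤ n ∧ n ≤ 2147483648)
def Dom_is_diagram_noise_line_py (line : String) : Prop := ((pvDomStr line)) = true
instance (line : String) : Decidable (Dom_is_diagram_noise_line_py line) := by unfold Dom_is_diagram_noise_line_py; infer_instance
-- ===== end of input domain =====

-- B replaces A's strip()/split() and its four counting passes by a single character-level
-- whitespace/word state machine over the raw line (alternative decomposition, same cost).

-- ===== PORT A =====
-- the float comparisons 'cnt/len(words) > 0.6/0.8/0.5' are ported as exact integer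
-- cross-multiplications (10*cnt > 6*n, 10*cnt > 8*n, 2*cnt > n), exact at these magnitudes
def is_diagram_noise_line_py (line : String) : Bool :=
  let stripped := PySem.Chars.strip line.toList
  if stripped = [] then false
  else
    let words := PySem.Chars.split₀ stripped
    if stripped.length ≤ 4 ∧ words.length ≤ 2 then true
    else if words.length ≥ 5 ∧
        10 * ((words.map (fun w => if w.length = 1 then (1 : Int) else 0)).sum)
          > 6 * (words.length : Int) then true
    else if words.length ≥ 3 ∧
        10 * ((words.map (fun w => if w.length ≤ 2 then (1 : Int) else 0)).sum)
          > 8 * (words.length : Int) then true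
    else
      let unique_chars := PySem.Set.ofList
        (PySem.Chars.replace (PySem.Chars.replace line.toList [' '] []) ['\n'] [])
      if PySem.Set.len unique_chars ≤ 2 ∧
          (PySem.Chars.replace line.toList [' '] []).length > 15 then true
      else if words.length > 4 ∧
        2 * ((words.map (fun w =>
            if w.length ≤ 2 ∧ PySem.Chars.strIsalpha w then (1 : Int) else 0)).sum)
          > (words.length : Int) then true
      else false

-- ===== PORT B =====
-- the loop state of Source B, one field per Python variable
structure PvState where
  n : Int
  single : Int
  short : Int
  letter : Int
  wl : Int
  alpha : Bool
  seen : Bool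
  gap : Int
  body : Int
  nonspace : Int
  chars : PySem.Set Char
deriving Repr

-- the word-flush block of Source B ('if wl: n += 1; …')
def pvFlush (st : PvState) : PvState :=
  { st with
    n := st.n + 1,
    single := if st.wl = 1 then st.single + 1 else st.single,
    short := if st.wl ≤ 2 then st.short + 1 else st.short,
    letter := if st.wl ≤ 2 ∧ st.alpha then st.letter + 1 else st.letter,
    wl := 0,
    alpha := true }

-- one iteration of Source B's loop body
def pvStep (st : PvState) (ch : Char) : PvState :=
  let st :=
    if PySem.Chars.isspace ch then
      let st := if st.wl ≠ 0 then pvFlush st else st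
      if st.seen then { st with gap := st.gap + 1 } else st
    else
      { st with
        seen := true,
        body := st.body + st.gap + 1,
        gap := 0,
        wl := st.wl + 1,
        alpha := if st.alpha ∧ PySem.Chars.isalpha ch = false then false else st.alpha }
  if ch ≠ ' ' then
    { st with
      nonspace := st.nonspace + 1,
      chars := if ch ≠ '\n' then st.chars.add ch else st.chars }
  else st

-- the float ratios 'single/n > 0.6' etc. are ported as the exact integer
-- cross-multiplications 5*single > 3*n, 5*short > 4*n, 2*letter > n
def is_diagram_noise_line_py_alt (line : String) : Bool :=
  let st0 : PvState := ⟨0, 0, 0, 0, 0, true, false, 0, 0, 0, PySem.Set.empty⟩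
  let st := line.toList.foldl pvStep st0
  let st := if st.wl ≠ 0 then pvFlush st else st
  if st.seen = false then false
  else
    decide ((st.body ≤ 4 ∧ st.n ≤ 2)
      ∨ (st.n ≥ 5 ∧ 5 * st.single > 3 * st.n)
      ∨ (st.n ≥ 3 ∧ 5 * st.short > 4 * st.n)
      ∨ (PySem.Set.len st.chars ≤ 2 ∧ st.nonspace > 15)
      ∨ (st.n > 4 ∧ 2 * st.letter > st.n))

-- ===== PRECONDITION & SPEC =====
def Spec_is_diagram_noise_line_py (line : String) (out : Bool) : Prop := out = is_diagram_noise_line_py_alt line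
instance (line : String) (out : Bool) : Decidable (Spec_is_diagram_noise_line_py line out) := by unfold Spec_is_diagram_noise_line_py; infer_instance

-- ===== CLAIM =====
def Claim_equal_is_diagram_noise_line_py : Prop := ∀ (line : String), Dom_is_diagram_noise_line_py line → Spec_is_diagram_noise_line_py line (is_diagram_noise_line_py line)

-- ===== LEMMAS AND PROOFS =====

-- flushing after the loop, as Source B does after the 'for'
def pvFinal (st : PvState) : PvState := if st.wl ≠ 0 then pvFlush st else st

theorem pvFinal_eq (st : PvState) : (if st.wl ≠ 0 then pvFlush st else st) = pvFinal st := rfl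

-- split₀.go's accumulator is purely positional
theorem pvGo_acc (s : List Char) (cur : List Char) (acc : List (List Char)) :
    PySem.Chars.split₀.go s cur acc = acc.reverse ++ PySem.Chars.split₀.go s cur [] := by
  induction s generalizing cur acc with
  | nil =>
    simp only [PySem.Chars.split₀.go]
    by_cases h : cur.isEmpty <;> simp [h]
  | cons c rest ih =>
    simp only [PySem.Chars.split₀.go]
    by_cases hs : PySem.Chars.isspace c
    · by_cases h : cur.isEmpty
      · simp only [hs, h, if_true]
        exact ih [] acc
      · simp only [hs, h, if_true, if_false, Bool.false_eq_true]
        rw [ih [] (cur.reverse :: acc), ih [] [cur.reverse]]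
        simp
    · simp only [hs, Bool.false_eq_true, if_false]
      exact ih (c :: cur) acc

-- trailing whitespace never contributes a word
theorem pvGo_all_ws (t : List Char) (cur : List Char) (acc : List (List Char))
    (h : ∀ c ∈ t, PySem.Chars.isspace c = true) :
    PySem.Chars.split₀.go t cur acc = PySem.Chars.split₀.go [] cur acc := by
  induction t generalizing cur acc with
  | nil => rfl
  | cons c rest ih =>
    have hc : PySem.Chars.isspace c = true := h c (by simp)
    have hrest : ∀ x ∈ rest, PySem.Chars.isspace x = true := fun x hx => h x (by simp [hx])
    simp only [PySem.Chars.split₀.go, hc, if_true]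
    by_cases hcur : cur.isEmpty
    · simp only [hcur, if_true]
      rw [ih [] acc hrest]
      simp [PySem.Chars.split₀.go]
    · simp only [hcur, Bool.false_eq_true, if_false]
      rw [ih [] (cur.reverse :: acc) hrest]
      simp [PySem.Chars.split₀.go]

theorem pvGo_append_ws (s t : List Char) (cur : List Char) (acc : List (List Char))
    (h : ∀ c ∈ t, PySem.Chars.isspace c = true) :
    PySem.Chars.split₀.go (s ++ t) cur acc = PySem.Chars.split₀.go s cur acc := by
  induction s generalizing cur acc with
  | nil => simpa using pvGo_all_ws t cur acc h
  | cons c rest ih =>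
    simp only [List.cons_append, PySem.Chars.split₀.go]
    by_cases hs : PySem.Chars.isspace c
    · by_cases hcur : cur.isEmpty <;> simp [hs, hcur, ih]
    · simp [hs, ih]

theorem pvGo_dropWhile (l : List Char) (acc : List (List Char)) :
    PySem.Chars.split₀.go (l.dropWhile PySem.Chars.isspace) [] acc
      = PySem.Chars.split₀.go l [] acc := by
  induction l with
  | nil => rfl
  | cons c rest ih =>
    by_cases hs : PySem.Chars.isspace c
    · rw [List.dropWhile_cons_of_pos hs, ih]
      simp [PySem.Chars.split₀.go, hs]
    · rw [List.dropWhile_cons_of_neg hs]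

-- split() of the stripped line is split() of the raw line
theorem pvSplit_strip (l : List Char) :
    PySem.Chars.split₀ (PySem.Chars.strip l) = PySem.Chars.split₀ l := by
  unfold PySem.Chars.split₀ PySem.Chars.strip PySem.Chars.lstrip
  set m := l.dropWhile PySem.Chars.isspace with hm
  have hdec : m = PySem.Chars.rstrip m ++ (m.reverse.takeWhile PySem.Chars.isspace).reverse := by
    unfold PySem.Chars.rstrip
    rw [← List.reverse_append, List.takeWhile_append_dropWhile, List.reverse_reverse]
  have hws : ∀ c ∈ (m.reverse.takeWhile PySem.Chars.isspace).reverse,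
      PySem.Chars.isspace c = true := by
    intro c hc
    exact List.mem_takeWhile_imp (List.mem_reverse.mp hc)
  rw [← pvGo_dropWhile l [], ← hm]
  conv_rhs => rw [hdec]
  rw [pvGo_append_ws _ _ _ _ hws]

theorem pvRstrip_eq_nil_iff (l : List Char) :
    PySem.Chars.rstrip l = [] ↔ ∀ c ∈ l, PySem.Chars.isspace c = true := by
  unfold PySem.Chars.rstrip
  rw [List.reverse_eq_nil_iff, List.dropWhile_eq_nil_iff]
  simp

theorem pvRstrip_cons (c : Char) (l : List Char) :
    PySem.Chars.rstrip (c :: l) =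
      if PySem.Chars.rstrip l = [] then
        (if PySem.Chars.isspace c then [] else [c])
      else c :: PySem.Chars.rstrip l := by
  unfold PySem.Chars.rstrip
  rw [List.reverse_cons, List.dropWhile_append]
  by_cases h : (l.reverse.dropWhile PySem.Chars.isspace).isEmpty
  · simp only [h, if_true]
    rw [List.isEmpty_iff] at h
    rw [h]
    by_cases hc : PySem.Chars.isspace c <;> simp [hc, List.dropWhile]
  · simp only [h, Bool.false_eq_true, if_false]
    rw [List.isEmpty_iff] at h
    simp [h]

theorem pvStrip_eq_nil_iff (l : List Char) :
    PySem.Chars.strip l = [] ↔ PySem.Chars.lstrip l = [] := by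
  unfold PySem.Chars.strip
  rw [pvRstrip_eq_nil_iff]
  constructor
  · intro h
    rcases hl : PySem.Chars.lstrip l with _ | ⟨c, t⟩
    · rfl
    · exfalso
      have hd : l.dropWhile PySem.Chars.isspace = c :: t := hl
      have hne : l.dropWhile PySem.Chars.isspace ≠ [] := by rw [hd]; simp
      have hc := List.head_dropWhile_not PySem.Chars.isspace hne
      have hceq : (l.dropWhile PySem.Chars.isspace).head hne = c := by
        simp [hd]
      rw [hceq] at hc
      have := h c (by rw [hl]; simp)
      simp [hc] at this
  · intro h; rw [h]; simp

-- ===== scan lemmas: the machine's fields against A's staged quantities =====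

-- the second stage of pvStep and pvFlush leave the word counters alone / the char counters alone
theorem pvScan_chars (s : List Char) (st : PvState) :
    (s.foldl pvStep st).nonspace
        = st.nonspace + ((s.filter (fun c => c != ' ')).length : Int)
      ∧ (s.foldl pvStep st).chars
        = List.foldl PySem.Set.add st.chars (s.filter (fun c => c != ' ' && c != '\n')) := by
  induction s generalizing st with
  | nil => simp
  | cons c rest ih =>
    simp only [List.foldl_cons, List.filter_cons]
    obtain ⟨ih1, ih2⟩ := ih (pvStep st c)
    by_cases hsp : c = ' '
    · have h1 : (c != ' ') = false := by simp [hsp]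
      have hst : (pvStep st c).nonspace = st.nonspace ∧ (pvStep st c).chars = st.chars := by
        subst hsp
        unfold pvStep
        split_ifs <;> (try simp_all [pvFlush]) <;> (try split_ifs) <;> simp_all
      rw [ih1, ih2, hst.1, hst.2]
      simp [h1]
    · have h1 : (c != ' ') = true := by simp [hsp]
      by_cases hnl : c = '\n'
      · have hst : (pvStep st c).nonspace = st.nonspace + 1 ∧ (pvStep st c).chars = st.chars := by
          unfold pvStep
          simp only [hnl]
          split_ifs <;> simp_all [pvFlush]
        rw [ih1, ih2, hst.1, hst.2]
        simp [h1, hnl]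
        omega
      · have hst : (pvStep st c).nonspace = st.nonspace + 1
            ∧ (pvStep st c).chars = st.chars.add c := by
          unfold pvStep
          split_ifs <;> (try simp_all [pvFlush]) <;> (try split_ifs) <;> simp_all
        rw [ih1, ih2, hst.1, hst.2]
        simp [h1, hnl]
        omega

-- word-field effect of one step, whitespace char, empty current word
theorem pvStep_ws_empty (st : PvState) (c : Char) (hs : PySem.Chars.isspace c = true)
    (hwl : st.wl = 0) :
    (pvStep st c).n = st.n ∧ (pvStep st c).single = st.single
      ∧ (pvStep st c).short = st.short ∧ (pvStep st c).letter = st.letter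
      ∧ (pvStep st c).wl = 0 ∧ (pvStep st c).alpha = st.alpha := by
  unfold pvStep
  simp only [hs, if_true]
  split_ifs <;> simp_all

theorem pvStep_ws_flush (st : PvState) (c : Char) (hs : PySem.Chars.isspace c = true)
    (hwl : st.wl ≠ 0) :
    (pvStep st c).n = (pvFlush st).n ∧ (pvStep st c).single = (pvFlush st).single
      ∧ (pvStep st c).short = (pvFlush st).short ∧ (pvStep st c).letter = (pvFlush st).letter
      ∧ (pvStep st c).wl = 0 ∧ (pvStep st c).alpha = true := by
  unfold pvStep
  simp only [hs, if_true]
  split_ifs <;> simp_all [pvFlush]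

theorem pvStep_word (st : PvState) (c : Char) (hs : PySem.Chars.isspace c = false) :
    (pvStep st c).n = st.n ∧ (pvStep st c).single = st.single
      ∧ (pvStep st c).short = st.short ∧ (pvStep st c).letter = st.letter
      ∧ (pvStep st c).wl = st.wl + 1
      ∧ (pvStep st c).alpha = (st.alpha && PySem.Chars.isalpha c) := by
  unfold pvStep
  simp only [hs, Bool.false_eq_true, if_false]
  split_ifs <;> simp_all

-- reversing the current word does not change its statistics
theorem pvStrIsalpha_reverse (cur : List Char) (h : cur ≠ []) :
    PySem.Chars.strIsalpha cur.reverse = cur.all PySem.Chars.isalpha := by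
  unfold PySem.Chars.strIsalpha
  simp [h, List.all_reverse]

-- the machine's word counters compute A's sums over split₀.go
theorem pvScan_words (s : List Char) (st : PvState) (cur : List Char)
    (hwl : st.wl = (cur.length : Int)) (ha : st.alpha = cur.all PySem.Chars.isalpha) :
    (pvFinal (s.foldl pvStep st)).n
        = st.n + ((PySem.Chars.split₀.go s cur []).length : Int)
      ∧ (pvFinal (s.foldl pvStep st)).single
        = st.single + ((PySem.Chars.split₀.go s cur []).map
            (fun w => if w.length = 1 then (1 : Int) else 0)).sum
      ∧ (pvFinal (s.foldl pvStep st)).short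
        = st.short + ((PySem.Chars.split₀.go s cur []).map
            (fun w => if w.length ≤ 2 then (1 : Int) else 0)).sum
      ∧ (pvFinal (s.foldl pvStep st)).letter
        = st.letter + ((PySem.Chars.split₀.go s cur []).map
            (fun w => if w.length ≤ 2 ∧ PySem.Chars.strIsalpha w then (1 : Int) else 0)).sum := by
  induction s generalizing st cur with
  | nil =>
    simp only [List.foldl_nil, PySem.Chars.split₀.go]
    rcases cur with _ | ⟨c, t⟩
    · have h0 : st.wl = 0 := by simpa using hwl
      unfold pvFinal
      simp [h0]
    · have h0 : st.wl ≠ 0 := by rw [hwl]; simp only [List.length_cons]; push_cast; omega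
      have hfin : pvFinal st = pvFlush st := by unfold pvFinal; rw [if_pos h0]
      have hlr : (c :: t).reverse.length = t.length + 1 := by simp
      have hwl' : st.wl = (t.length : Int) + 1 := by rw [hwl]; simp only [List.length_cons]; push_cast; omega
      have halpha : PySem.Chars.strIsalpha (c :: t).reverse = st.alpha := by
        rw [ha]; exact pvStrIsalpha_reverse _ (by simp)
      rw [hfin]
      simp only [List.isEmpty_cons, Bool.false_eq_true, if_false, List.reverse_cons,
        List.reverse_nil, List.nil_append, List.map_cons, List.map_nil, List.sum_cons,
        List.sum_nil, List.length_cons, List.length_nil, add_zero, pvFlush]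
      refine ⟨by push_cast; ring, ?_, ?_, ?_⟩
      · by_cases h1 : st.wl = 1
        · have h2 : (t.reverse ++ [c]).length = 1 := by simp only [List.length_append, List.length_reverse, List.length_cons, List.length_nil]; omega
          rw [if_pos h1, if_pos h2]
        · have h2 : ¬ (t.reverse ++ [c]).length = 1 := by simp only [List.length_append, List.length_reverse, List.length_cons, List.length_nil]; omega
          rw [if_neg h1, if_neg h2]; ring
      · by_cases h1 : st.wl ≤ 2
        · have h2 : (t.reverse ++ [c]).length ≤ 2 := by simp only [List.length_append, List.length_reverse, List.length_cons, List.length_nil]; omega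
          rw [if_pos h1, if_pos h2]
        · have h2 : ¬ (t.reverse ++ [c]).length ≤ 2 := by simp only [List.length_append, List.length_reverse, List.length_cons, List.length_nil]; omega
          rw [if_neg h1, if_neg h2]; ring
      · have halpha' : PySem.Chars.strIsalpha (t.reverse ++ [c]) = st.alpha := by
          simpa using halpha
        by_cases h1 : st.wl ≤ 2 ∧ st.alpha = true
        · have h2 : (t.reverse ++ [c]).length ≤ 2 ∧ PySem.Chars.strIsalpha (t.reverse ++ [c]) = true := by
            refine ⟨by simp only [List.length_append, List.length_reverse, List.length_cons, List.length_nil]; omega, by rw [halpha']; exact h1.2⟩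
          rw [if_pos h1, if_pos h2]
        · have h2 : ¬ ((t.reverse ++ [c]).length ≤ 2 ∧ PySem.Chars.strIsalpha (t.reverse ++ [c]) = true) := by
            intro ⟨u1, u2⟩
            refine h1 ⟨?_, by rw [← halpha']; exact u2⟩
            simp only [List.length_append, List.length_reverse, List.length_cons, List.length_nil] at u1; omega
          rw [if_neg h1, if_neg h2]; ring
  | cons c rest ih =>
    simp only [List.foldl_cons]
    by_cases hs : PySem.Chars.isspace c
    · by_cases hcur : cur.isEmpty
      · have hcur' : cur = [] := List.isEmpty_iff.mp hcur
        have h0 : st.wl = 0 := by rw [hwl, hcur']; simp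
        obtain ⟨e1, e2, e3, e4, e5, e6⟩ := pvStep_ws_empty st c hs h0
        have hgo : PySem.Chars.split₀.go (c :: rest) cur []
            = PySem.Chars.split₀.go rest [] [] := by
          simp [PySem.Chars.split₀.go, hs, hcur]
        obtain ⟨i1, i2, i3, i4⟩ := ih (pvStep st c) []
          (by simpa using e5) (by rw [e6, ha, hcur'])
        rw [hgo, i1, i2, i3, i4, e1, e2, e3, e4]
        exact ⟨rfl, rfl, rfl, rfl⟩
      · have hcur' : cur ≠ [] := by
          intro hh; rw [hh] at hcur; simp at hcur
        have h0 : st.wl ≠ 0 := by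
          rw [hwl]; simpa using hcur'
        obtain ⟨e1, e2, e3, e4, e5, e6⟩ := pvStep_ws_flush st c hs h0
        have hgo : PySem.Chars.split₀.go (c :: rest) cur []
            = cur.reverse :: PySem.Chars.split₀.go rest [] [] := by
          have : PySem.Chars.split₀.go (c :: rest) cur []
              = PySem.Chars.split₀.go rest [] [cur.reverse] := by
            simp [PySem.Chars.split₀.go, hs, hcur]
          rw [this, pvGo_acc rest [] [cur.reverse]]
          simp
        obtain ⟨i1, i2, i3, i4⟩ := ih (pvStep st c) []
          (by simpa using e5) (by simp [e6])
        have halpha : PySem.Chars.strIsalpha cur.reverse = st.alpha := by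
          rw [ha]; exact pvStrIsalpha_reverse _ hcur'
        have hlen : cur.reverse.length = cur.length := by simp
        rw [hgo, i1, i2, i3, i4, e1, e2, e3, e4]
        simp only [pvFlush, List.length_cons, List.map_cons, List.sum_cons]
        refine ⟨by push_cast; ring, ?_, ?_, ?_⟩
        · by_cases h1 : st.wl = 1
          · have h2 : cur.reverse.length = 1 := by rw [hlen, ← Nat.cast_inj (R := Int), ← hwl, h1]; rfl
            rw [if_pos h1, if_pos h2]; ring
          · have h2 : ¬ cur.reverse.length = 1 := by
              rw [hlen]; intro hh; exact h1 (by rw [hwl, hh]; rfl)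
            rw [if_neg h1, if_neg h2]; ring
        · by_cases h1 : st.wl ≤ 2
          · have h2 : cur.reverse.length ≤ 2 := by rw [hlen]; rw [hwl] at h1; exact_mod_cast h1
            rw [if_pos h1, if_pos h2]; ring
          · have h2 : ¬ cur.reverse.length ≤ 2 := by
              rw [hlen]; intro hh; exact h1 (by rw [hwl]; exact_mod_cast hh)
            rw [if_neg h1, if_neg h2]; ring
        · by_cases h1 : st.wl ≤ 2 ∧ st.alpha = true
          · have h2 : cur.reverse.length ≤ 2 ∧ PySem.Chars.strIsalpha cur.reverse = true := by
              refine ⟨by rw [hlen]; rw [hwl] at h1; exact_mod_cast h1.1, by rw [halpha]; exact h1.2⟩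
            rw [if_pos h1, if_pos h2]; ring
          · have h2 : ¬ (cur.reverse.length ≤ 2 ∧ PySem.Chars.strIsalpha cur.reverse = true) := by
              intro ⟨u1, u2⟩
              refine h1 ⟨?_, by rw [← halpha]; exact u2⟩
              rw [hlen] at u1; rw [hwl]; exact_mod_cast u1
            rw [if_neg h1, if_neg h2]; ring
    · obtain ⟨e1, e2, e3, e4, e5, e6⟩ := pvStep_word st c (by simpa using hs)
      have hwl' : (pvStep st c).wl = (((c :: cur).length : Nat) : Int) := by
        rw [e5, hwl]; simp only [List.length_cons]; push_cast; omega
      have ha' : (pvStep st c).alpha = (c :: cur).all PySem.Chars.isalpha := by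
        rw [e6, ha]; simp only [List.all_cons]; exact Bool.and_comm _ _
      have hgo : PySem.Chars.split₀.go (c :: rest) cur []
          = PySem.Chars.split₀.go rest (c :: cur) [] := by
        simp [PySem.Chars.split₀.go, hs]
      obtain ⟨i1, i2, i3, i4⟩ := ih (pvStep st c) (c :: cur) hwl' ha'
      rw [hgo, i1, i2, i3, i4, e1, e2, e3, e4]
      exact ⟨rfl, rfl, rfl, rfl⟩

-- body/seen once a non-whitespace character has been seen
theorem pvScan_body_seen (s : List Char) (st : PvState) (hseen : st.seen = true) :
    (s.foldl pvStep st).seen = true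
      ∧ (s.foldl pvStep st).body
        = (if PySem.Chars.rstrip s = [] then st.body
           else st.body + st.gap + ((PySem.Chars.rstrip s).length : Int)) := by
  induction s generalizing st with
  | nil => simp [PySem.Chars.rstrip, hseen]
  | cons c rest ih =>
    simp only [List.foldl_cons]
    rw [pvRstrip_cons]
    by_cases hs : PySem.Chars.isspace c
    · have hst : (pvStep st c).seen = true ∧ (pvStep st c).gap = st.gap + 1
          ∧ (pvStep st c).body = st.body := by
        unfold pvStep
        simp only [hs, if_true]
        split_ifs <;> simp_all [pvFlush]
      obtain ⟨ihs, ihb⟩ := ih (pvStep st c) hst.1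
      refine ⟨ihs, ?_⟩
      rw [ihb, hst.2.1, hst.2.2]
      by_cases h : PySem.Chars.rstrip rest = [] <;> simp [h, hs] <;> ring
    · have hst : (pvStep st c).seen = true ∧ (pvStep st c).gap = 0
          ∧ (pvStep st c).body = st.body + st.gap + 1 := by
        unfold pvStep
        simp only [hs, Bool.false_eq_true, if_false]
        split_ifs <;> simp_all
      obtain ⟨ihs, ihb⟩ := ih (pvStep st c) hst.1
      refine ⟨ihs, ?_⟩
      rw [ihb, hst.2.1, hst.2.2]
      by_cases h : PySem.Chars.rstrip rest = [] <;> simp [h, hs] <;> ring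
-- body/seen from the initial (nothing seen) state
theorem pvScan_body_unseen (s : List Char) (st : PvState)
    (hseen : st.seen = false) (hgap : st.gap = 0) :
    (s.foldl pvStep st).seen = !(PySem.Chars.lstrip s).isEmpty
      ∧ (s.foldl pvStep st).body = st.body + ((PySem.Chars.strip s).length : Int) := by
  induction s generalizing st with
  | nil => simp [PySem.Chars.lstrip, PySem.Chars.strip, PySem.Chars.rstrip, hseen]
  | cons c rest ih =>
    simp only [List.foldl_cons]
    by_cases hs : PySem.Chars.isspace c
    · have hst : (pvStep st c).seen = false ∧ (pvStep st c).gap = 0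
          ∧ (pvStep st c).body = st.body := by
        unfold pvStep
        simp only [hs, if_true]
        split_ifs <;> simp_all [pvFlush]
      have hls : PySem.Chars.lstrip (c :: rest) = PySem.Chars.lstrip rest := by
        simp [PySem.Chars.lstrip, List.dropWhile_cons_of_pos hs]
      have hstrip : PySem.Chars.strip (c :: rest) = PySem.Chars.strip rest := by
        simp [PySem.Chars.strip, hls]
      obtain ⟨ihs, ihb⟩ := ih (pvStep st c) hst.1 hst.2.1
      rw [ihs, ihb, hst.2.2, hls, hstrip]
      exact ⟨rfl, rfl⟩
    · have hst : (pvStep st c).seen = true ∧ (pvStep st c).gap = 0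
          ∧ (pvStep st c).body = st.body + 1 := by
        unfold pvStep
        simp only [hs, Bool.false_eq_true, if_false]
        split_ifs <;> simp_all
      have hls : PySem.Chars.lstrip (c :: rest) = c :: rest := by
        simp [PySem.Chars.lstrip, List.dropWhile_cons_of_neg hs]
      have hstrip : PySem.Chars.strip (c :: rest) = PySem.Chars.rstrip (c :: rest) := by
        simp [PySem.Chars.strip, PySem.Chars.lstrip,
          List.dropWhile_cons_of_neg hs]
      obtain ⟨ihs, ihb⟩ := pvScan_body_seen rest (pvStep st c) hst.1
      rw [ihs, ihb, hst.2.1, hst.2.2, hls, hstrip, pvRstrip_cons]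
      refine ⟨by simp, ?_⟩
      by_cases h : PySem.Chars.rstrip rest = [] <;> simp [h, hs] <;> ring
-- pvFinal only touches word counters
theorem pvFinal_other (st : PvState) :
    (pvFinal st).seen = st.seen ∧ (pvFinal st).body = st.body
      ∧ (pvFinal st).nonspace = st.nonspace ∧ (pvFinal st).chars = st.chars := by
  unfold pvFinal
  split_ifs <;> simp_all [pvFlush]

-- str.replace(x, "") with a one-character x is a filter
theorem pvReplaceGo_filter (c : Char) (fuel : Nat) (l : List Char) (acc : List Char)
    (h : l.length ≤ fuel) :
    PySem.Chars.replace.go [c] [] fuel l acc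
      = acc.reverse ++ l.filter (fun x => x != c) := by
  induction fuel generalizing l acc with
  | zero =>
    have : l = [] := by rcases l with _ | _ <;> simp_all
    subst this
    simp [PySem.Chars.replace.go]
  | succ fuel ih =>
    rcases l with _ | ⟨d, t⟩
    · simp [PySem.Chars.replace.go]
    · have hpre : [c].isPrefixOf (d :: t) = (c == d) := by simp [List.isPrefixOf]
      simp only [PySem.Chars.replace.go, hpre]
      by_cases hcd : c = d
      · have hb : (c == d) = true := by simp [hcd]
        simp only [hb, if_true, List.length_singleton, List.drop_succ_cons, List.drop_zero, List.reverse_nil, List.nil_append]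
        rw [ih t acc (by simp at h; omega)]
        have hd : (d != c) = false := by simp [hcd]
        simp [hd]
      · have : (c == d) = false := by simp [hcd]
        simp only [this, Bool.false_eq_true, if_false]
        rw [ih t (d :: acc) (by simp at h; omega)]
        have : (d != c) = true := by simp [Ne.symm hcd]
        simp [this]

theorem pvReplace_filter (l : List Char) (c : Char) :
    PySem.Chars.replace l [c] [] = l.filter (fun x => x != c) := by
  unfold PySem.Chars.replace
  simp only [List.isEmpty_cons, Bool.false_eq_true, if_false]
  exact pvReplaceGo_filter c l.length l [] le_rfl

-- ===== VERDICT =====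
theorem is_diagram_noise_line_py_spec : Claim_equal_is_diagram_noise_line_py := by
  intro line _
  show is_diagram_noise_line_py line = is_diagram_noise_line_py_alt line
  unfold is_diagram_noise_line_py is_diagram_noise_line_py_alt
  dsimp only
  set l := line.toList with hl
  set st0 : PvState := ⟨0, 0, 0, 0, 0, true, false, 0, 0, 0, PySem.Set.empty⟩ with hst0
  rw [pvFinal_eq]
  -- char-set / nonspace facts
  obtain ⟨hns, hch⟩ := pvScan_chars l st0
  obtain ⟨hfs, hfb, hfns, hfch⟩ := pvFinal_other (l.foldl pvStep st0)
  -- body / seen facts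
  obtain ⟨hseen, hbody⟩ := pvScan_body_unseen l st0 rfl rfl
  -- word counter facts
  obtain ⟨hn, h1, h2, h3⟩ := pvScan_words l st0 [] (by simp [hst0]) (by simp [hst0])
  -- rewrite words of the stripped line to split₀.go of the raw line
  have hwords : PySem.Chars.split₀ (PySem.Chars.strip l) = PySem.Chars.split₀.go l [] [] := by
    rw [pvSplit_strip]; rfl
  -- A-side replace chain is a filter
  have hrep1 : PySem.Chars.replace l [' '] [] = l.filter (fun x => x != ' ') :=
    pvReplace_filter l ' '
  have hrep2 : PySem.Chars.replace (PySem.Chars.replace l [' '] []) ['\n'] []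
      = l.filter (fun c => c != ' ' && c != '\n') := by
    rw [hrep1, pvReplace_filter, List.filter_filter]
    exact List.filter_congr (fun x _ => Bool.and_comm _ _)
  by_cases hempty : PySem.Chars.strip l = []
  · have hseenF : (pvFinal (l.foldl pvStep st0)).seen = false := by
      rw [hfs, hseen]
      have := (pvStrip_eq_nil_iff l).mp hempty
      simp [this]
    simp only [hempty, if_true, hseenF, if_true]
  · have hseenT : (pvFinal (l.foldl pvStep st0)).seen = true := by
      rw [hfs, hseen]
      have : PySem.Chars.lstrip l ≠ [] := fun hh => hempty ((pvStrip_eq_nil_iff l).mpr hh)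
      simp [this]
    simp only [hempty, if_false, hseenT, Bool.true_eq_false, if_false]
    rw [hwords]
    -- name the shared quantities
    set W := PySem.Chars.split₀.go l [] [] with hW
    have hbodyF : (pvFinal (l.foldl pvStep st0)).body
        = ((PySem.Chars.strip l).length : Int) := by
      rw [hfb, hbody]; simp [hst0]
    have hnF : (pvFinal (l.foldl pvStep st0)).n = (W.length : Int) := by
      rw [hn]; simp [hst0]
    have h1F : (pvFinal (l.foldl pvStep st0)).single
        = (W.map (fun w => if w.length = 1 then (1 : Int) else 0)).sum := by
      rw [h1]; simp [hst0]
    have h2F : (pvFinal (l.foldl pvStep st0)).short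
        = (W.map (fun w => if w.length ≤ 2 then (1 : Int) else 0)).sum := by
      rw [h2]; simp [hst0]
    have h3F : (pvFinal (l.foldl pvStep st0)).letter
        = (W.map (fun w => if w.length ≤ 2 ∧ PySem.Chars.strIsalpha w then (1 : Int) else 0)).sum := by
      rw [h3]; simp [hst0]
    have hchF : (pvFinal (l.foldl pvStep st0)).chars
        = PySem.Set.ofList (l.filter (fun c => c != ' ' && c != '\n')) := by
      rw [hfch, hch]; simp [hst0, PySem.Set.ofList]
    have hnsF : (pvFinal (l.foldl pvStep st0)).nonspace
        = ((l.filter (fun x => x != ' ')).length : Int) := by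
      rw [hfns, hns]; simp [hst0]
    rw [hbodyF, hnF, h1F, h2F, h3F, hchF, hnsF, hrep2, hrep1]
    split_ifs with g1 g2 g3 g4 g5 <;> symm <;>
      simp only [decide_eq_true_iff, decide_eq_false_iff_not] <;> omega
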